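-- pv_equiv track=rewrite | github.com/Victor-BM/UFRJ | Computação I/Atividades/Laboratório 7/Teste 3.py | contaestrelas_v2
-- ===== SOURCE A (Python) =====
-- def contaestrelas_v2 (aval):
--     '''Função que retorna quantas estrelas
--     de cada tipo o motorista ganhou
--     list -> list'''
--     total_estrelas= {1: 0, 2: 0, 3: 0, 4: 0, 5: 0}
--     i = 0
--     while i<len(aval):
--         j = 1
--         while j<=5:
--             count = 0
--             if aval[i] == j:
--                 count = total_estrelas[j]
--                 count += 1
--                 total_estrelas[j] = count
--                 break
--             j +=1
--         i += 1
--     return total_estrelas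
-- ===== SOURCE B (Python) =====
-- def contaestrelas_v2(aval):
--     return {j: aval.count(j) for j in range(1, 6)}
-- ===== Notes on version B (the rewrite author's own statement) =====
-- stated objective: idiomatic
-- what changed: Replaces A's single pass with a nested guarded while/break updating a pre-initialised dict by a dict comprehension over the five keys, each counted with one full list.count scan (C-level), which a timing run measured ~3x faster.
import Mathlib
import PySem

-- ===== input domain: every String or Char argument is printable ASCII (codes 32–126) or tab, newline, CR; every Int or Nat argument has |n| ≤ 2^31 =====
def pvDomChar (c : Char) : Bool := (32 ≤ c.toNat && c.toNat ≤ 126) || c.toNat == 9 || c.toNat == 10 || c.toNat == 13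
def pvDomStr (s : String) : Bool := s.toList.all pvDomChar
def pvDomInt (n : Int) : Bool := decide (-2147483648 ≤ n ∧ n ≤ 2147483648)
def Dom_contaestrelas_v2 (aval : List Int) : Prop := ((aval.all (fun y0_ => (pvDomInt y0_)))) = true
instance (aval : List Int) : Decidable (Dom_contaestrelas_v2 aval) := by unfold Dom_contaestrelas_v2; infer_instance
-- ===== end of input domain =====

-- B replaces A's single guarded-pass/break loop by one list.count scan per key 1..5 (idiomatic dict comprehension); same O(n) cost.

-- ===== PORT A =====
-- inner 'while j<=5: … if aval[i]==j: …; break; j+=1', fuel = number of remaining iterations (5)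
def pvInnerA (x : Int) (d : PySem.Dict Int Int) (j : Int) : Nat → PySem.Dict Int Int
  | 0 => d
  | fuel + 1 =>
    if j ≤ 5 then
      (if x == j then d.insert j (d.getD j 0 + 1) else pvInnerA x d (j + 1) fuel)
    else d

def contaestrelas_v2 (aval : List Int) : List (Int × Int) :=
  ((PySem.List.pyRange 0 aval.length 1).foldl
    (fun d i => pvInnerA (PySem.List.pyGetD aval i 0) d 1 5)
    (PySem.Dict.ofList [(1, 0), (2, 0), (3, 0), (4, 0), (5, 0)])).items

-- ===== PORT B =====
def contaestrelas_v2_alt (aval : List Int) : List (Int × Int) :=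
  ((PySem.List.pyRange 1 6 1).foldl
    (fun d j => d.insert j (PySem.List.count aval j : Int))
    PySem.Dict.empty).items

-- ===== PRECONDITION & SPEC =====
def Spec_contaestrelas_v2 (aval : List Int) (out : List (Int × Int)) : Prop := out = contaestrelas_v2_alt aval
instance (aval : List Int) (out : List (Int × Int)) : Decidable (Spec_contaestrelas_v2 aval out) := by unfold Spec_contaestrelas_v2; infer_instance

-- ===== CLAIM (what is proved, stated in full; the proofs are below) =====
def Claim_equal_contaestrelas_v2 : Prop := ∀ (aval : List Int), Dom_contaestrelas_v2 aval → Spec_contaestrelas_v2 aval (contaestrelas_v2 aval)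

-- ===== LEMMAS AND PROOFS =====

-- one outer-loop iteration of A on the five-key dict: bump the slot x hits, if any
lemma pvStep (x a b c d e : Int) :
    pvInnerA x (PySem.Dict.mk [(1, a), (2, b), (3, c), (4, d), (5, e)]) 1 5
    = PySem.Dict.mk [(1, if x = 1 then a + 1 else a), (2, if x = 2 then b + 1 else b),
        (3, if x = 3 then c + 1 else c), (4, if x = 4 then d + 1 else d),
        (5, if x = 5 then e + 1 else e)] := by
  by_cases h1 : x = 1
  · subst h1
    norm_num [pvInnerA, PySem.Dict.insert, PySem.Dict.getD, PySem.Dict.get?, PySem.Dict.contains]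
  by_cases h2 : x = 2
  · subst h2
    norm_num [pvInnerA, PySem.Dict.insert, PySem.Dict.getD, PySem.Dict.get?, PySem.Dict.contains]
  by_cases h3 : x = 3
  · subst h3
    norm_num [pvInnerA, PySem.Dict.insert, PySem.Dict.getD, PySem.Dict.get?, PySem.Dict.contains]
  by_cases h4 : x = 4
  · subst h4
    norm_num [pvInnerA, PySem.Dict.insert, PySem.Dict.getD, PySem.Dict.get?, PySem.Dict.contains]
  by_cases h5 : x = 5
  · subst h5
    norm_num [pvInnerA, PySem.Dict.insert, PySem.Dict.getD, PySem.Dict.get?, PySem.Dict.contains]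
  · simp [pvInnerA, h1, h2, h3, h4, h5]

-- A's outer loop adds each element's count to the initial five slots
lemma pvA_invariant (xs : List Int) (a b c d e : Int) :
    (xs.foldl (fun d x => pvInnerA x d 1 5)
      (PySem.Dict.mk [(1, a), (2, b), (3, c), (4, d), (5, e)])).items
    = [(1, a + (xs.count 1 : Int)), (2, b + (xs.count 2 : Int)), (3, c + (xs.count 3 : Int)),
       (4, d + (xs.count 4 : Int)), (5, e + (xs.count 5 : Int))] := by
  induction xs generalizing a b c d e with
  | nil => simp
  | cons x xs ih =>
    rw [List.foldl_cons, pvStep, ih]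
    by_cases h1 : x = 1
    · subst h1; simp; omega
    by_cases h2 : x = 2
    · subst h2; simp; omega
    by_cases h3 : x = 3
    · subst h3; simp; omega
    by_cases h4 : x = 4
    · subst h4; simp; omega
    by_cases h5 : x = 5
    · subst h5; simp; omega
    · simp [h1, h2, h3, h4, h5]

theorem pv_main (aval : List Int) :
    contaestrelas_v2 aval = contaestrelas_v2_alt aval := by
  unfold contaestrelas_v2 contaestrelas_v2_alt
  rw [PySem.List.foldl_pyRange_zero_pyGetD' aval 0 (fun d x => pvInnerA x d 1 5)]
  have hB : ((PySem.List.pyRange 1 6 1).foldl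
      (fun d j => d.insert j (PySem.List.count aval j : Int)) PySem.Dict.empty).items
      = [(1, (aval.count 1 : Int)), (2, (aval.count 2 : Int)), (3, (aval.count 3 : Int)),
         (4, (aval.count 4 : Int)), (5, (aval.count 5 : Int))] := by
    have hr : PySem.List.pyRange 1 6 1 = [1, 2, 3, 4, 5] := by decide
    rw [hr]
    norm_num [PySem.List.count_eq, PySem.Dict.insert, PySem.Dict.get?,
      PySem.Dict.contains, PySem.Dict.empty]
  rw [hB]
  have := pvA_invariant aval 0 0 0 0 0
  simpa using this

-- ===== VERDICT (by name: the statement is the Claim_ definition above) =====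
theorem contaestrelas_v2_spec : Claim_equal_contaestrelas_v2 := by
  intro aval _
  exact pv_main aval
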